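-- pv_equiv track=rewrite | github.com/benjaminkeizer1-svg/Sleep-Time-Model | apply_improvements.py | to_source
-- ===== SOURCE A (Python) =====
-- def to_source(text):
--     """Convert a string to the notebook source format (list of lines)."""
--     lines = text.split('\n')
--     result = []
--     for i, line in enumerate(lines):
--         if i < len(lines) - 1:
--             result.append(line + '\n')
--         else:
--             result.append(line)
--     # Remove trailing empty string if present
--     if result and result[-1] == '':
--         result.pop()
--     return result
-- ===== SOURCE B (Python) =====
-- def to_source(text):
--     """Convert a string to the notebook source format (list of lines)."""
--     result = []
--     cur = ''
--     for ch in text: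
--         cur += ch
--         if ch == '\n':
--             result.append(cur)
--             cur = ''
--     if cur:
--         result.append(cur)
--     return result
-- ===== Notes on version B (the rewrite author's own statement) =====
-- stated objective: simpler
-- what changed: Replaces the split-on-newline list plus an enumerate loop with index comparisons and a trailing pop by a single forward pass that accumulates the current line, emits it whenever a newline character is seen, and appends the leftover only if nonempty.
import Mathlib
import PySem

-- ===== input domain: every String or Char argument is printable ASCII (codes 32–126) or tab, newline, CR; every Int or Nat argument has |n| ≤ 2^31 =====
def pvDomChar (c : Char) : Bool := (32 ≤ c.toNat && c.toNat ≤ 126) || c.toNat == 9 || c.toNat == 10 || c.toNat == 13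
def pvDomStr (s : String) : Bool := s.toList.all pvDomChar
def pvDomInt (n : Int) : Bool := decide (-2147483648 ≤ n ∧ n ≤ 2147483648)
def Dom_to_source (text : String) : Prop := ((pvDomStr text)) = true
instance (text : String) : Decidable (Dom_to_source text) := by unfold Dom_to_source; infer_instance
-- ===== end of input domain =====

-- B replaces split+enumerate+pop by one accumulator pass over the characters; objective: simpler.


-- ===== PORT A =====
-- lines = text.split('\n'); for i, line in enumerate(lines): '\n' back on all but the last;
-- then 'if result and result[-1] == "": result.pop()' (= drop the last element).
def to_source (text : String) : List String :=
  let lines := PySem.Chars.splitOn text.toList ['\n']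
  let result := (PySem.List.enumerate lines 0).foldl
    (fun (r : List (List Char)) (p : Int × List Char) =>
      if p.1 < (lines.length : Int) - 1 then r ++ [p.2 ++ ['\n']] else r ++ [p.2]) []
  let result := if result.getLast? = some ([] : List Char) then result.dropLast else result
  result.map (fun l => String.ofList l)

-- ===== PORT B =====
-- loop body of B: cur += ch; if ch == '\n': result.append(cur); cur = ''
def bStep (st : List (List Char) × List Char) (ch : Char) : List (List Char) × List Char :=
  let cur := st.2 ++ [ch]
  if ch = '\n' then (st.1 ++ [cur], []) else (st.1, cur)

-- single pass: cur += ch; emit cur at each '\n'; append the nonempty leftover.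
def to_source_alt (text : String) : List String :=
  let st := text.toList.foldl bStep ([], [])
  let result := if st.2 ≠ [] then st.1 ++ [st.2] else st.1
  result.map (fun l => String.ofList l)

-- ===== PRECONDITION & SPEC =====
def Spec_to_source (text : String) (out : List String) : Prop := out = to_source_alt text
instance (text : String) (out : List String) : Decidable (Spec_to_source text out) := by unfold Spec_to_source; infer_instance

-- ===== CLAIM (what is proved, stated in full; the proofs are below) =====
def Claim_equal_to_source : Prop := ∀ (text : String), Dom_to_source text → Spec_to_source text (to_source text)

-- ===== LEMMAS AND PROOFS =====

-- reference: Python split('\n') accumulating the current piece forward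
def splitCh (pre : List Char) : List Char → List (List Char)
  | [] => [pre]
  | d :: rest => if d = '\n' then pre :: splitCh [] rest else splitCh (pre ++ [d]) rest

theorem splitCh_ne_nil (pre : List Char) (cs : List Char) : splitCh pre cs ≠ [] := by
  induction cs generalizing pre with
  | nil => simp [splitCh]
  | cons d rest ih =>
    simp only [splitCh]
    split
    · simp
    · exact ih _

theorem splitOn_go_eq (cs : List Char) : ∀ (fuel : Nat) (cur : List Char) (acc : List (List Char)),
    cs.length < fuel →
    PySem.Chars.splitOn.go ['\n'] fuel cs cur acc = acc.reverse ++ splitCh cur.reverse cs := by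
  induction cs with
  | nil =>
    intro fuel cur acc h
    match fuel with
    | f + 1 => simp [PySem.Chars.splitOn.go, splitCh]
  | cons c rest ih =>
    intro fuel cur acc h
    match fuel with
    | f + 1 =>
      by_cases hc : c = '\n'
      · subst hc
        have hpre : (['\n'] : List Char).isPrefixOf ('\n' :: rest) = true := by
          simp [List.isPrefixOf]
        simp only [PySem.Chars.splitOn.go, List.length_cons] at h ⊢
        rw [if_pos hpre]
        have hdrop : List.drop (([] : List Char).length + 1) ('\n' :: rest) = rest := by simp
        rw [hdrop, ih f [] (cur.reverse :: acc) (by omega)]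
        simp [splitCh]
      · have hpre : (['\n'] : List Char).isPrefixOf (c :: rest) = false := by
          simp [List.isPrefixOf]
          exact fun h' => hc h'.symm
        simp only [PySem.Chars.splitOn.go, List.length_cons] at *
        rw [if_neg (by rw [hpre]; simp), ih f (c :: cur) acc (by omega)]
        simp [splitCh, hc]

theorem splitOn_eq (cs : List Char) : PySem.Chars.splitOn cs ['\n'] = splitCh [] cs := by
  unfold PySem.Chars.splitOn
  rw [splitOn_go_eq cs (cs.length + 1) [] [] (by omega)]
  simp

theorem getLast?_cons_ne {α : Type} (x : α) (l : List α) (h : l ≠ []) :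
    (x :: l).getLast? = l.getLast? := by
  cases l with
  | nil => exact absurd rfl h
  | cons y t => simp [List.getLast?_cons_cons]

theorem foldB_eq (cs : List Char) : ∀ (acc : List (List Char)) (cur : List Char),
    cs.foldl bStep (acc, cur)
    = (acc ++ (splitCh cur cs).dropLast.map (· ++ ['\n']), (splitCh cur cs).getLastD []) := by
  induction cs with
  | nil => intro acc cur; simp [splitCh]
  | cons d rest ih =>
    intro acc cur
    rw [List.foldl_cons]
    by_cases hd : d = '\n'
    · subst hd
      have hstep : bStep (acc, cur) '\n' = (acc ++ [cur ++ ['\n']], []) := by simp [bStep]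
      rw [hstep, ih]
      have hne := splitCh_ne_nil [] rest
      simp [splitCh, List.dropLast_cons_of_ne_nil hne, List.getLastD_eq_getLast?, getLast?_cons_ne _ _ hne]
    · have hstep : bStep (acc, cur) d = (acc, cur ++ [d]) := by simp [bStep, hd]
      rw [hstep, ih]
      simp [splitCh, hd]

theorem foldA_eq (ls : List (List Char)) : ∀ (s n : Int) (acc : List (List Char)),
    ls ≠ [] → n = s + ls.length →
    (PySem.List.enumerate ls s).foldl
      (fun (r : List (List Char)) (p : Int × List Char) =>
        if p.1 < n - 1 then r ++ [p.2 ++ ['\n']] else r ++ [p.2]) acc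
    = acc ++ ls.dropLast.map (· ++ ['\n']) ++ [ls.getLastD []] := by
  induction ls with
  | nil => intro s n acc h _; exact absurd rfl h
  | cons x rest ih =>
    intro s n acc _ hn
    rw [PySem.List.enumerate_cons]
    cases rest with
    | nil =>
      have : ¬ (s < n - 1) := by simp at hn; omega
      simp [PySem.List.enumerate_nil, this]
    | cons y t =>
      have hlt : s < n - 1 := by simp at hn; omega
      simp only [List.foldl_cons, if_pos hlt]
      rw [ih (s+1) n (acc ++ [x ++ ['\n']]) (by simp) (by simp at hn ⊢; omega)]
      simp [List.dropLast_cons_of_ne_nil (List.cons_ne_nil y t), List.getLastD_eq_getLast?,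
            getLast?_cons_ne _ _ (List.cons_ne_nil y t)]

-- ===== VERDICT (by name: the statement is the Claim_ definition above) =====
theorem to_source_spec : Claim_equal_to_source := by
  intro text _
  unfold Spec_to_source to_source to_source_alt
  simp only [splitOn_eq, foldB_eq]
  set cs := text.toList with hcs
  set L := splitCh [] cs with hL
  have hne : L ≠ [] := splitCh_ne_nil [] cs
  rw [foldA_eq L 0 (L.length : Int) [] hne (by omega)]
  simp only [List.nil_append]
  by_cases hlast : L.getLastD ([] : List Char) = []
  · rw [hlast]
    have h1 : (L.dropLast.map (· ++ ['\n']) ++ [([] : List Char)]).getLast? = some [] := by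
      simp
    rw [if_pos h1, if_neg (by simp)]
    simp
  · have h1 : (L.dropLast.map (· ++ ['\n']) ++ [L.getLastD []]).getLast? = some (L.getLastD []) := by
      simp
    rw [if_pos (by simpa [List.getLastD_eq_getLast?] using hlast : (L.getLastD [] ≠ [])), h1, if_neg (by simpa [List.getLastD_eq_getLast?] using hlast)]
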